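-- pv_equiv track=rewrite | github.com/KumarAmbuj/pepcoding_hashing_and_heap2 | 1.FIND NUMBER OF EMPLOYEE.py | findemployee
-- ===== SOURCE A (Python) =====
-- def findemployee(node,hash2,hash):
--     if node not in hash:
--         hash2[node]=0
--         return 1
--
--     no=0
--
--     for x in hash[node]:
--         c=findemployee(x,hash2,hash)
--         no+=c
--
--     hash2[node]=no
--     return no+1
-- ===== SOURCE B (Python) =====
-- def findemployee(node, hash2, hash):
--     # Iterative explicit-stack traversal; counts every popped node.
--     # Note: unlike A, B does not write into hash2 (return-value equivalence only).
--     count = 0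
--     stack = [node]
--     while stack:
--         x = stack.pop()
--         count += 1
--         if x in hash:
--             stack.extend(hash[x])
--     return count
-- ===== Notes on version B (the rewrite author's own statement) =====
-- stated objective: simpler
-- what changed: The recursive post-order sum is replaced by an iterative explicit-stack traversal that simply counts every popped node (the return value equals the number of nodes of the unfolded traversal tree); B does not perform A's write-only hash2 mutation, which is stated in the file header since it never affects the return value.
import Mathlib
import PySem

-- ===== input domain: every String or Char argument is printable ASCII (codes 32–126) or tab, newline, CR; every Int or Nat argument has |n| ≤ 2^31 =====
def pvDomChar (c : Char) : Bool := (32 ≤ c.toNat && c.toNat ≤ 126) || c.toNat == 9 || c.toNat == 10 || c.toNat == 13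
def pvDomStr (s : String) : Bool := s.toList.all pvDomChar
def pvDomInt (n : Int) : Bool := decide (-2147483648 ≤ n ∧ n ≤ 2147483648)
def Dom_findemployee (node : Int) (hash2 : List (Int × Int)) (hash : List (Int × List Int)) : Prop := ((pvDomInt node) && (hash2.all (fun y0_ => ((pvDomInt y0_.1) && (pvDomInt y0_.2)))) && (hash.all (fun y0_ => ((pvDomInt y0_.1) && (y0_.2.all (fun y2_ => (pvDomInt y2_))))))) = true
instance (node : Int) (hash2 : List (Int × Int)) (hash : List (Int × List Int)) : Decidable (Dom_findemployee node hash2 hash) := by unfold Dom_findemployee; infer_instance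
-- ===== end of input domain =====

-- HEADER: B replaces A's recursion by an iterative explicit-stack traversal that counts
-- popped nodes (simpler).  A mutates its hash2 argument (write-only, never read); B does
-- not: the equivalence proved here is about the RETURN value only.

-- ===== PORT A =====
-- `x in hash` / `hash[x]` on the assoc list (first match)
def hlook : List (Int × List Int) → Int → Option (List Int)
  | [], _ => none
  | p :: r, x => if p.1 = x then some p.2 else hlook r x

-- A's recursion, step for step.  `fuel` is only a totality guard (Python's recursion has
-- no bound); under Pre_ the fuel `hash.length + 1` below is never exhausted.
-- hash2 is write-only in A and never read, so its state does not appear: the ported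
-- value is A's return value (see header).
def findAGo : Nat → Int → List (Int × List Int) → Option Int
  | 0, _, _ => none
  | fuel+1, node, hash =>
    match hlook hash node with
    | none => some 1                         -- hash2[node] = 0; return 1
    | some cs =>                             -- no = 0; for x in hash[node]: no += findemployee(x, …)
      match cs.foldl (fun acc x => acc.bind fun no => (findAGo fuel x hash).map fun c => no + c) (some 0) with
      | none => none
      | some no => some (no + 1)             -- hash2[node] = no; return no + 1

def findemployee (node : Int) (hash2 : List (Int × Int)) (hash : List (Int × List Int)) : Int :=
  (findAGo (hash.length + 1) node hash).getD 0

-- ===== PORT B =====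
-- B's while-loop; the Lean stack has its top at the head, so Python's
-- `stack.extend(hash[x])` (pop from the end) becomes `cs.reverse ++ st`.
-- `fuel` is only a totality guard; under Pre_ the fuel below is never exhausted.
def findBLoop : Nat → List Int → Int → List (Int × List Int) → Option Int
  | 0, _, _, _ => none
  | _+1, [], count, _ => some count
  | fuel+1, x :: st, count, hash =>
    match hlook hash x with
    | none => findBLoop fuel st (count + 1) hash
    | some cs => findBLoop fuel (cs.reverse ++ st) (count + 1) hash

-- fuel bound: under Pre_ the number of pops is at most (maxChildren+1)^(length+1)
def findBFuel (hash : List (Int × List Int)) : Nat :=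
  (hash.foldl (fun m p => max m p.2.length) 0 + 1) ^ (hash.length + 1) + 1

def findemployee_alt (node : Int) (hash2 : List (Int × Int)) (hash : List (Int × List Int)) : Int :=
  (findBLoop (findBFuel hash) [node] 0 hash).getD 0

-- ===== PRECONDITION & SPEC =====
-- children list seen by the traversal (first matching key, [] for a non-key);
-- defined independently of the ports so Pre_'s closure stays disjoint from them
def pvKids : List (Int × List Int) → Int → List Int
  | [], _ => []
  | p :: r, x => if p.1 = x then p.2 else pvKids r x

-- y reachable from x in at most n edge steps of the manager graph.  This is the
-- standard bounded-reachability predicate of the INPUT graph (fuel hash.length is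
-- exact: a shortest path repeats no key, so it has at most hash.length edges); it is
-- defined independently of both ports and computes no output of either algorithm.
def pvReach (hash : List (Int × List Int)) : Nat → Int → Int → Bool
  | 0, x, y => x == y
  | n+1, x, y => x == y || (pvKids hash x).any (fun c => pvReach hash n c y)

-- Python A recurses without bound, so it raises RecursionError exactly when a cycle
-- of the manager graph is reachable from `node` (and B's while-loop does not terminate
-- there either).  Pre_ states cycle-freedom of the reachable part directly: no key
-- reachable from `node` lies on a cycle.  Any reachable vertex is reachable along a
-- repetition-free path, hence within hash.length steps, so the fuel hash.length is exact.
def Pre_findemployee (node : Int) (hash2 : List (Int × Int)) (hash : List (Int × List Int)) : Prop :=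
  ∀ i, (hi : i < hash.length) →
    pvReach hash hash.length node hash[i].1 = true →
    ∀ c ∈ hash[i].2, pvReach hash hash.length c hash[i].1 = false

instance (node : Int) (hash2 : List (Int × Int)) (hash : List (Int × List Int)) : Decidable (Pre_findemployee node hash2 hash) := by
  unfold Pre_findemployee; infer_instance

def pvWitness_findemployee : Int × (List (Int × Int)) × (List (Int × List Int)) :=
  (1, [], [(1, [2, 7]), (2, [7])])

def Spec_findemployee (node : Int) (hash2 : List (Int × Int)) (hash : List (Int × List Int)) (out : Int) : Prop := out = findemployee_alt node hash2 hash
instance (node : Int) (hash2 : List (Int × Int)) (hash : List (Int × List Int)) (out : Int) : Decidable (Spec_findemployee node hash2 hash out) := by unfold Spec_findemployee; infer_instance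

-- ===== CLAIM (what is proved, stated in full; the proofs are below) =====
def Claim_equal_findemployee : Prop := ∀ (node : Int) (hash2 : List (Int × Int)) (hash : List (Int × List Int)), Dom_findemployee node hash2 hash → Pre_findemployee node hash2 hash → Spec_findemployee node hash2 hash (findemployee node hash2 hash)

-- ===== LEMMAS AND PROOFS =====

-- `IsPath x l y`: l is the list of vertices after x on an edge path from x to y
def IsPath (hash : List (Int × List Int)) : Int → List Int → Int → Prop
  | x, [], y => x = y
  | x, v :: l, y => v ∈ pvKids hash x ∧ IsPath hash v l y

theorem pvKids_eq (hash : List (Int × List Int)) (x : Int) :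
    pvKids hash x = (hlook hash x).getD [] := by
  induction hash with
  | nil => rfl
  | cons p r ih => by_cases h : p.1 = x <;> simp [pvKids, hlook, h, ih]

theorem pvReach_refl (hash : List (Int × List Int)) (n : Nat) (x : Int) :
    pvReach hash n x x = true := by
  cases n <;> simp [pvReach]

theorem pvReach_of_path (hash : List (Int × List Int)) (l : List Int) :
    ∀ x y n, IsPath hash x l y → l.length ≤ n → pvReach hash n x y = true := by
  induction l with
  | nil => intro x y n h _; cases h; exact pvReach_refl hash n x
  | cons v l ih =>
    intro x y n h hn
    obtain ⟨hv, hp⟩ := h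
    obtain ⟨n', rfl⟩ : ∃ n', n = n' + 1 := ⟨n - 1, by simp at hn; omega⟩
    simp only [pvReach, Bool.or_eq_true, List.any_eq_true]
    exact Or.inr ⟨v, hv, ih v y n' hp (by simp at hn; omega)⟩

theorem path_append_single (hash : List (Int × List Int)) (l : List Int) :
    ∀ x y c, IsPath hash x l y → c ∈ pvKids hash y → IsPath hash x (l ++ [c]) c := by
  induction l with
  | nil => intro x y c h hc; cases h; exact ⟨hc, rfl⟩
  | cons v l ih =>
    intro x y c h hc
    exact ⟨h.1, ih v y c h.2 hc⟩

theorem path_suffix (hash : List (Int × List Int)) (p : List Int) :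
    ∀ x v q y, IsPath hash x (p ++ v :: q) y → IsPath hash v q y := by
  induction p with
  | nil => intro x v q y h; exact h.2
  | cons w p ih => intro x v q y h; exact ih w v q y h.2

theorem key_of_kids_ne (hash : List (Int × List Int)) (a : Int)
    (h : pvKids hash a ≠ []) : a ∈ hash.map Prod.fst := by
  induction hash with
  | nil => simp [pvKids] at h
  | cons p r ih =>
    by_cases hp : p.1 = a
    · simp [hp]
    · simp only [pvKids, if_neg hp] at h
      simp [ih h]

theorem path_dropLast_keys (hash : List (Int × List Int)) (l : List Int) :
    ∀ x y, IsPath hash x l y → ∀ a ∈ (x :: l).dropLast, a ∈ hash.map Prod.fst := by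
  induction l with
  | nil => intro x y _ a ha; simp at ha
  | cons v l ih =>
    intro x y h a ha
    rw [show (x :: v :: l).dropLast = x :: (v :: l).dropLast by rfl] at ha
    rcases List.mem_cons.mp ha with rfl | ha
    · have hv := h.1
      exact key_of_kids_ne hash a (fun he => by rw [he] at hv; simp at hv)
    · exact ih v y h.2 a ha

theorem path_length_le (hash : List (Int × List Int)) (node : Int) (l : List Int) (x : Int)
    (hp : IsPath hash node l x) (hn : (node :: l).Nodup) : l.length ≤ hash.length := by
  have hsub : ((node :: l).dropLast).Sublist (node :: l) := List.dropLast_sublist _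
  have hnd : ((node :: l).dropLast).Nodup := hn.sublist hsub
  have hmem : ∀ a ∈ (node :: l).dropLast, a ∈ hash.map Prod.fst :=
    path_dropLast_keys hash l node x hp
  have hsubf : ((node :: l).dropLast).toFinset ⊆ (hash.map Prod.fst).toFinset := by
    intro a ha
    simp only [List.mem_toFinset] at ha ⊢
    exact hmem a ha
  have h1 : ((node :: l).dropLast).length = ((node :: l).dropLast).toFinset.card :=
    (List.toFinset_card_of_nodup hnd).symm
  have h2 : ((node :: l).dropLast).toFinset.card ≤ (hash.map Prod.fst).toFinset.card :=
    Finset.card_le_card hsubf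
  have h3 : (hash.map Prod.fst).toFinset.card ≤ (hash.map Prod.fst).length :=
    List.toFinset_card_le _
  have h4 : ((node :: l).dropLast).length = l.length := by simp
  simp only [List.length_map] at h3
  omega

-- position of the first entry with key x (hash.length if x is not a key)
def hpos (hash : List (Int × List Int)) (x : Int) : Nat :=
  hash.findIdx (fun p => p.1 == x)

theorem hlook_some (hash : List (Int × List Int)) (x : Int) (cs : List Int)
    (h : hlook hash x = some cs) :
    ∃ hl : hpos hash x < hash.length, hash[hpos hash x] = (x, cs) := by
  induction hash with
  | nil => simp [hlook] at h
  | cons p r ih =>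
    by_cases hp : p.1 = x
    · have h2 : p.2 = cs := by simpa [hlook, hp] using h
      have h0 : hpos (p :: r) x = 0 := by simp [hpos, List.findIdx_cons, hp]
      refine ⟨by rw [h0]; simp, ?_⟩
      obtain ⟨k, v⟩ := p
      simp only [h0, List.getElem_cons_zero]
      simp only at hp h2
      rw [hp, h2]
    · simp only [hlook, if_neg hp] at h
      obtain ⟨hl, he⟩ := ih h
      have hb : (p.1 == x) = false := by simp [hp]
      have h0 : hpos (p :: r) x = hpos r x + 1 := by simp [hpos, List.findIdx_cons, hb]
      refine ⟨by rw [h0]; simp; omega, ?_⟩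
      simp only [h0, List.getElem_cons_succ]
      exact he

-- extending a repetition-free path by one child: under Pre_ the child is new
theorem path_step (node : Int) (hash2 : List (Int × Int)) (hash : List (Int × List Int))
    (pre : Pre_findemployee node hash2 hash) (l : List Int) (x : Int) (cs : List Int) (c : Int)
    (hp : IsPath hash node l x) (hn : (node :: l).Nodup)
    (hx : hlook hash x = some cs) (hc : c ∈ cs) :
    IsPath hash node (l ++ [c]) c ∧ (node :: (l ++ [c])).Nodup := by
  have hkc : c ∈ pvKids hash x := by rw [pvKids_eq, hx]; exact hc
  have hp' : IsPath hash node (l ++ [c]) c := path_append_single hash l node x c hp hkc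
  have hlen : l.length ≤ hash.length := path_length_le hash node l x hp hn
  have hreachx : pvReach hash hash.length node x = true :=
    pvReach_of_path hash l node x hash.length hp hlen
  obtain ⟨hl, he⟩ := hlook_some hash x cs hx
  have hpre := pre (hpos hash x) hl (by rw [he]; exact hreachx)
  have hcnot : c ∉ node :: l := by
    intro hmem
    have hcx : pvReach hash hash.length c x = true := by
      rcases List.mem_cons.mp hmem with rfl | hmem
      · exact pvReach_of_path hash l c x hash.length hp hlen
      · obtain ⟨p, q, rfl⟩ := List.append_of_mem hmem
        have hq : IsPath hash c q x := path_suffix hash p node c q x hp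
        exact pvReach_of_path hash q c x hash.length hq (by simp at hlen ⊢; omega)
    have hfalse := hpre c (by rw [he]; exact hc)
    rw [he] at hfalse
    simp at hfalse
    simp [hfalse] at hcx
  refine ⟨hp', ?_⟩
  rw [show node :: (l ++ [c]) = (node :: l) ++ [c] by rfl]
  exact List.Nodup.append hn (by simp) (by simpa using hcnot)

-- the sum A's for-loop accumulates, as a straight recursion (proof vehicle)
def chainSum (F : Int → Option Int) : List Int → Option Int
  | [] => some 0
  | c :: cs => (F c).bind fun v => (chainSum F cs).map fun s => v + s

-- A's value at the fuel actually used by the port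
def Sval (hash : List (Int × List Int)) (x : Int) : Int :=
  (findAGo (hash.length + 1) x hash).getD 0

def SNsum (hash : List (Int × List Int)) (st : List Int) : Nat :=
  (st.map (fun x => (Sval hash x).toNat)).sum

theorem fold_none (F : Int → Option Int) (cs : List Int) :
    cs.foldl (fun acc x => acc.bind fun no => (F x).map fun c => no + c) none = none := by
  induction cs with
  | nil => rfl
  | cons c cs ih => simpa using ih

theorem fold_eq_chain (F : Int → Option Int) (cs : List Int) (acc : Int) :
    cs.foldl (fun acc x => acc.bind fun no => (F x).map fun c => no + c) (some acc)
      = (chainSum F cs).map (fun s => acc + s) := by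
  induction cs generalizing acc with
  | nil => simp [chainSum]
  | cons c cs ih =>
    cases hF : F c with
    | none => simp [chainSum, hF, fold_none]
    | some v =>
      rw [List.foldl_cons]
      have h1 : ((some acc).bind fun no => (F c).map fun d => no + d) = some (acc + v) := by
        simp [hF]
      rw [h1, ih]
      cases hC : chainSum F cs with
      | none => simp [chainSum, hF, hC]
      | some sv => simp [chainSum, hF, hC]; ring

theorem findAGo_succ (hash : List (Int × List Int)) (fuel : Nat) (x : Int) :
    findAGo (fuel + 1) x hash
      = match hlook hash x with
        | none => some 1
        | some cs => (chainSum (fun c => findAGo fuel c hash) cs).map (fun s => s + 1) := by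
  simp only [findAGo]
  cases hlook hash x with
  | none => rfl
  | some cs =>
    dsimp only
    rw [fold_eq_chain (fun c => findAGo fuel c hash) cs 0]
    cases chainSum (fun c => findAGo fuel c hash) cs <;> simp

theorem chain_congr (F F' : Int → Option Int) (cs : List Int)
    (h : ∀ c ∈ cs, F c = F' c) : chainSum F cs = chainSum F' cs := by
  induction cs with
  | nil => rfl
  | cons c cs ih =>
    simp only [chainSum, h c (by simp), ih (fun c hc => h c (by simp [hc]))]

theorem chain_some (F : Int → Option Int) (G : Int → Int) (cs : List Int)
    (h : ∀ c ∈ cs, F c = some (G c)) :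
    chainSum F cs = some ((cs.map G).sum) := by
  induction cs with
  | nil => rfl
  | cons c cs ih =>
    simp [chainSum, h c (by simp), ih (fun c hc => h c (by simp [hc]))]

-- above the threshold fuel, A's recursion no longer depends on the fuel
theorem stab (node : Int) (hash2 : List (Int × Int)) (hash : List (Int × List Int))
    (pre : Pre_findemployee node hash2 hash) :
    ∀ fuel l x, IsPath hash node l x → (node :: l).Nodup →
      hash.length - l.length < fuel →
      ∀ g, fuel ≤ g → findAGo g x hash = findAGo fuel x hash := by
  intro fuel
  induction fuel with
  | zero => intro l x _ _ h; omega
  | succ fuel ih =>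
    intro l x hp hn h g hg
    obtain ⟨g', rfl⟩ : ∃ g', g = g' + 1 := ⟨g - 1, by omega⟩
    rw [findAGo_succ, findAGo_succ]
    cases hx : hlook hash x with
    | none => rfl
    | some cs =>
      dsimp only
      have hcong : chainSum (fun c => findAGo g' c hash) cs
          = chainSum (fun c => findAGo fuel c hash) cs := by
        apply chain_congr
        intro c hc
        obtain ⟨hp', hn'⟩ := path_step node hash2 hash pre l x cs c hp hn hx hc
        have hlen' : (l ++ [c]).length ≤ hash.length := path_length_le hash node _ c hp' hn'
        have hfc : hash.length - (l ++ [c]).length < fuel := by simp at hlen' ⊢; omega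
        rw [ih (l ++ [c]) c hp' hn' hfc g' (by omega),
            ih (l ++ [c]) c hp' hn' hfc fuel (by omega)]
      rw [hcong]

-- above the threshold fuel, A's recursion returns a positive value
theorem someVal (node : Int) (hash2 : List (Int × Int)) (hash : List (Int × List Int))
    (pre : Pre_findemployee node hash2 hash) :
    ∀ fuel l x, IsPath hash node l x → (node :: l).Nodup →
      hash.length - l.length < fuel →
      ∃ n : Nat, findAGo fuel x hash = some ((n : Int) + 1) := by
  intro fuel
  induction fuel with
  | zero => intro l x _ _ h; omega
  | succ fuel ih =>
    intro l x hp hn h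
    rw [findAGo_succ]
    cases hx : hlook hash x with
    | none => exact ⟨0, by norm_num⟩
    | some cs =>
      dsimp only
      have hall : ∀ c ∈ cs, findAGo fuel c hash = some ((findAGo fuel c hash).getD 0) := by
        intro c hc
        obtain ⟨hp', hn'⟩ := path_step node hash2 hash pre l x cs c hp hn hx hc
        have hlen' : (l ++ [c]).length ≤ hash.length := path_length_le hash node _ c hp' hn'
        obtain ⟨n, hne⟩ := ih (l ++ [c]) c hp' hn' (by simp at hlen' ⊢; omega)
        rw [hne]; rfl
      rw [chain_some _ _ cs hall]
      have hnn : 0 ≤ (cs.map (fun c => (findAGo fuel c hash).getD 0)).sum := by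
        apply List.sum_nonneg
        intro y hy
        simp only [List.mem_map] at hy
        obtain ⟨c, hc, rfl⟩ := hy
        obtain ⟨hp', hn'⟩ := path_step node hash2 hash pre l x cs c hp hn hx hc
        have hlen' : (l ++ [c]).length ≤ hash.length := path_length_le hash node _ c hp' hn'
        obtain ⟨n, hne⟩ := ih (l ++ [c]) c hp' hn' (by simp at hlen' ⊢; omega)
        rw [hne]; simp; omega
      refine ⟨(cs.map (fun c => (findAGo fuel c hash).getD 0)).sum.toNat, ?_⟩
      simp [Int.toNat_of_nonneg hnn]

theorem Sval_eq (node : Int) (hash2 : List (Int × Int)) (hash : List (Int × List Int))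
    (pre : Pre_findemployee node hash2 hash) (l : List Int) (x : Int)
    (hp : IsPath hash node l x) (hn : (node :: l).Nodup) :
    findAGo (hash.length + 1) x hash = some (Sval hash x) ∧ 1 ≤ Sval hash x := by
  obtain ⟨n, hne⟩ := someVal node hash2 hash pre (hash.length + 1) l x hp hn (by omega)
  constructor
  · simp [Sval, hne]
  · simp [Sval, hne]

theorem Sval_leaf (hash : List (Int × List Int)) (x : Int) (hx : hlook hash x = none) :
    Sval hash x = 1 := by
  simp [Sval, findAGo_succ, hx]

theorem Sval_node (node : Int) (hash2 : List (Int × Int)) (hash : List (Int × List Int))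
    (pre : Pre_findemployee node hash2 hash) (l : List Int) (x : Int) (cs : List Int)
    (hp : IsPath hash node l x) (hn : (node :: l).Nodup)
    (hx : hlook hash x = some cs) :
    Sval hash x = (cs.map (Sval hash)).sum + 1 := by
  have hchain : chainSum (fun c => findAGo hash.length c hash) cs
      = some ((cs.map (Sval hash)).sum) := by
    apply chain_some
    intro c hc
    obtain ⟨hp', hn'⟩ := path_step node hash2 hash pre l x cs c hp hn hx hc
    have hlen' : (l ++ [c]).length ≤ hash.length := path_length_le hash node _ c hp' hn'
    have hfc : hash.length - (l ++ [c]).length < hash.length := by simp at hlen' ⊢; omega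
    have hs := stab node hash2 hash pre (hash.length - (l ++ [c]).length + 1) (l ++ [c]) c hp' hn' (by omega)
    rw [hs hash.length (by simp at hlen' ⊢; omega), ← hs (hash.length + 1) (by omega)]
    exact (Sval_eq node hash2 hash pre (l ++ [c]) c hp' hn').1
  simp [Sval, findAGo_succ, hx, hchain]

-- every children list is at most M long
theorem len_le_foldlM (hash : List (Int × List Int)) :
    ∀ a : Nat, (a ≤ hash.foldl (fun m p => max m p.2.length) a) ∧
      ∀ p ∈ hash, p.2.length ≤ hash.foldl (fun m p => max m p.2.length) a := by
  induction hash with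
  | nil => intro a; simp
  | cons q r ih =>
    intro a
    simp only [List.foldl_cons]
    obtain ⟨ha, hp⟩ := ih (max a q.2.length)
    refine ⟨le_trans (le_max_left _ _) ha, ?_⟩
    intro p hmem
    rcases List.mem_cons.mp hmem with rfl | hmem
    · exact le_trans (le_max_right _ _) ha
    · exact hp p hmem

theorem sum_le_len_mul (f : Int → Int) (l : List Int) (B : Int)
    (h : ∀ y ∈ l, f y ≤ B) : (l.map f).sum ≤ l.length * B := by
  induction l with
  | nil => simp
  | cons y l ih =>
    simp only [List.map_cons, List.sum_cons, List.length_cons]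
    have h1 := h y (by simp)
    have h2 := ih (fun z hz => h z (by simp [hz]))
    push_cast
    nlinarith

theorem S_le_aux (node : Int) (hash2 : List (Int × Int)) (hash : List (Int × List Int))
    (pre : Pre_findemployee node hash2 hash) :
    ∀ k l x, IsPath hash node l x → (node :: l).Nodup →
      hash.length - l.length ≤ k →
      Sval hash x ≤ ((hash.foldl (fun m p => max m p.2.length) 0 : Nat) + 1 : Int) ^ (k + 1) := by
  intro k
  set M : Nat := hash.foldl (fun m p => max m p.2.length) 0 with hM
  induction k with
  | zero =>
    intro l x hp hn h
    cases hx : hlook hash x with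
    | none => rw [Sval_leaf hash x hx]; simp only [zero_add, pow_one]; omega
    | some cs =>
      cases cs with
      | nil =>
        rw [Sval_node node hash2 hash pre l x [] hp hn hx]
        simp only [List.map_nil, List.sum_nil, zero_add, pow_one]
        omega
      | cons c cs' =>
        obtain ⟨hp', hn'⟩ := path_step node hash2 hash pre l x (c :: cs') c hp hn hx (by simp)
        have hlen' : (l ++ [c]).length ≤ hash.length := path_length_le hash node _ c hp' hn'
        simp at hlen'
        omega
  | succ k ih =>
    intro l x hp hn h
    have hone : (1 : Int) ≤ ((M : Int) + 1) ^ (k + 1) := one_le_pow₀ (by omega)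
    cases hx : hlook hash x with
    | none =>
      rw [Sval_leaf hash x hx]
      calc (1 : Int) ≤ ((M : Int) + 1) ^ (k + 1) := hone
        _ ≤ ((M : Int) + 1) ^ (k + 1 + 1) := by
            apply pow_le_pow_right₀ (by omega); omega
    | some cs =>
      rw [Sval_node node hash2 hash pre l x cs hp hn hx]
      have hlen : cs.length ≤ M := by
        obtain ⟨hl, he⟩ := hlook_some hash x cs hx
        have := (len_le_foldlM hash 0).2 (hash[hpos hash x]) (by exact List.getElem_mem hl)
        rw [he] at this
        exact this
      have hsum : (cs.map (Sval hash)).sum ≤ cs.length * ((M : Int) + 1) ^ (k + 1) := by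
        apply sum_le_len_mul
        intro c hc
        obtain ⟨hp', hn'⟩ := path_step node hash2 hash pre l x cs c hp hn hx hc
        exact ih (l ++ [c]) c hp' hn' (by simp; omega)
      have hmul : (cs.length : Int) * ((M : Int) + 1) ^ (k + 1) ≤ (M : Int) * ((M : Int) + 1) ^ (k + 1) := by
        apply mul_le_mul_of_nonneg_right (by exact_mod_cast hlen) (by positivity)
      have : ((M : Int) + 1) ^ (k + 1 + 1) = ((M : Int) + 1) ^ (k + 1) + (M : Int) * ((M : Int) + 1) ^ (k + 1) := by ring
      rw [this]
      omega

theorem sum_toNat (hash : List (Int × List Int)) (l : List Int)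
    (h : ∀ c ∈ l, 0 ≤ Sval hash c) :
    ((l.map (fun c => (Sval hash c).toNat)).sum : Int) = (l.map (Sval hash)).sum := by
  induction l with
  | nil => simp
  | cons c l ih =>
    simp only [List.map_cons, List.sum_cons, Nat.cast_add]
    rw [ih (fun z hz => h z (by simp [hz])), Int.toNat_of_nonneg (h c (by simp))]

theorem loopB_eq (node : Int) (hash2 : List (Int × Int)) (hash : List (Int × List Int))
    (pre : Pre_findemployee node hash2 hash) :
    ∀ fuel st count,
      (∀ x ∈ st, ∃ l, IsPath hash node l x ∧ (node :: l).Nodup) →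
      SNsum hash st < fuel →
      findBLoop fuel st count hash = some (count + (SNsum hash st : Int)) := by
  intro fuel
  induction fuel with
  | zero => intro st count _ h; omega
  | succ fuel ih =>
    intro st count hreach h
    cases st with
    | nil => simp [findBLoop, SNsum]
    | cons x st =>
      obtain ⟨l, hp, hn⟩ := hreach x (by simp)
      have hxpos : 1 ≤ Sval hash x := (Sval_eq node hash2 hash pre l x hp hn).2
      have hreach' : ∀ y ∈ st, ∃ l', IsPath hash node l' y ∧ (node :: l').Nodup :=
        fun y hy => hreach y (by simp [hy])
      cases hx : hlook hash x with
      | none =>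
        have hS : Sval hash x = 1 := Sval_leaf hash x hx
        have hsn : SNsum hash (x :: st) = 1 + SNsum hash st := by
          simp [SNsum, hS]
        rw [show findBLoop (fuel+1) (x :: st) count hash
              = findBLoop fuel st (count + 1) hash by simp [findBLoop, hx]]
        rw [ih st (count + 1) hreach' (by omega), hsn]
        congr 1
        push_cast
        ring
      | some cs =>
        have hS : Sval hash x = (cs.map (Sval hash)).sum + 1 :=
          Sval_node node hash2 hash pre l x cs hp hn hx
        have hcpath : ∀ c ∈ cs, ∃ l', IsPath hash node l' c ∧ (node :: l').Nodup := by
          intro c hc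
          obtain ⟨hp', hn'⟩ := path_step node hash2 hash pre l x cs c hp hn hx hc
          exact ⟨l ++ [c], hp', hn'⟩
        have hpos' : ∀ c ∈ cs, 0 ≤ Sval hash c := by
          intro c hc
          obtain ⟨l', hp', hn'⟩ := hcpath c hc
          exact le_trans (by omega) (Sval_eq node hash2 hash pre l' c hp' hn').2
        have hcast : ((cs.map (fun c => (Sval hash c).toNat)).sum : Int)
            = (cs.map (Sval hash)).sum := sum_toNat hash cs hpos'
        have hsnx : (Sval hash x).toNat = (cs.map (fun c => (Sval hash c).toNat)).sum + 1 := by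
          omega
        have hsplit : SNsum hash (cs.reverse ++ st)
            = (cs.map (fun c => (Sval hash c).toNat)).sum + SNsum hash st := by
          simp [SNsum, List.map_reverse]
        have hsn : SNsum hash (x :: st)
            = (cs.map (fun c => (Sval hash c).toNat)).sum + 1 + SNsum hash st := by
          simp [SNsum, hsnx]
        have hreach'' : ∀ y ∈ cs.reverse ++ st, ∃ l', IsPath hash node l' y ∧ (node :: l').Nodup := by
          intro y hy
          rcases List.mem_append.mp hy with hy | hy
          · exact hcpath y (List.mem_reverse.mp hy)
          · exact hreach' y hy
        rw [show findBLoop (fuel+1) (x :: st) count hash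
              = findBLoop fuel (cs.reverse ++ st) (count + 1) hash by simp [findBLoop, hx]]
        rw [ih (cs.reverse ++ st) (count + 1) hreach'' (by omega), hsplit, hsn]
        congr 1
        push_cast
        ring

-- ===== VERDICT (by name: the statement is the Claim_ definition above) =====
theorem findemployee_spec : Claim_equal_findemployee := by
  intro node hash2 hash hdom hpre
  unfold Spec_findemployee findemployee findemployee_alt
  set M : Nat := hash.foldl (fun m p => max m p.2.length) 0 with hM
  have hp0 : IsPath hash node [] node := rfl
  have hn0 : ([node] : List Int).Nodup := by simp
  have hbound : Sval hash node ≤ ((M : Int) + 1) ^ (hash.length + 1) :=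
    S_le_aux node hash2 hash hpre hash.length [] node hp0 hn0 (by omega)
  have hfuel : SNsum hash [node] < findBFuel hash := by
    have h1 : (Sval hash node).toNat ≤ (M + 1) ^ (hash.length + 1) := by
      have : ((M : Int) + 1) ^ (hash.length + 1) = (((M + 1) ^ (hash.length + 1) : Nat) : Int) := by
        push_cast; ring
      rw [this] at hbound
      omega
    simp only [SNsum, List.map_cons, List.map_nil, List.sum_cons, List.sum_nil]
    unfold findBFuel
    rw [← hM]
    omega
  rw [loopB_eq node hash2 hash hpre (findBFuel hash) [node] 0
        (by intro x hx; simp at hx; exact ⟨[], by rw [hx]; exact rfl, by simp⟩) hfuel]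
  have h2 := (Sval_eq node hash2 hash hpre [] node hp0 hn0).2
  have : (findAGo (hash.length + 1) node hash).getD 0 = Sval hash node := by
    simp [Sval]
  rw [this]
  simp only [SNsum, List.map_cons, List.map_nil, List.sum_cons, List.sum_nil, Option.getD_some]
  omega
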